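-- pv_equiv track=rewrite | github.com/pitkali/birds-api | birds/test_storage.py | is_same_dictionary
-- ===== SOURCE A (Python) =====
-- def is_same_dictionary(a, b):
--     """Shallow dictionary comparison"""
--     keysA = set(a.keys())
--     keysB = set(b.keys())
--     sharedKeys = keysA & keysB
--     if len(keysA) != len(keysB) or len(sharedKeys) != len(keysB):
--         return False
--     for k, v in a.items():
--         if b[k] != v:
--             return False
--     return True
-- ===== SOURCE B (Python) =====
-- def is_same_dictionary(a, b):
--     """Shallow dictionary comparison"""
--     return sorted(a.items(), key=lambda kv: kv[0]) == sorted(b.items(), key=lambda kv: kv[0])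
-- ===== Notes on version B (the rewrite author's own statement) =====
-- stated objective: alternative
-- what changed: B replaces A's key-set construction, intersection/cardinality guard and per-key lookup loop by a canonicalise-and-compare algorithm: sort both item lists by key and compare the sorted lists for equality (no sets, no membership tests, no lookups).
import Mathlib
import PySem

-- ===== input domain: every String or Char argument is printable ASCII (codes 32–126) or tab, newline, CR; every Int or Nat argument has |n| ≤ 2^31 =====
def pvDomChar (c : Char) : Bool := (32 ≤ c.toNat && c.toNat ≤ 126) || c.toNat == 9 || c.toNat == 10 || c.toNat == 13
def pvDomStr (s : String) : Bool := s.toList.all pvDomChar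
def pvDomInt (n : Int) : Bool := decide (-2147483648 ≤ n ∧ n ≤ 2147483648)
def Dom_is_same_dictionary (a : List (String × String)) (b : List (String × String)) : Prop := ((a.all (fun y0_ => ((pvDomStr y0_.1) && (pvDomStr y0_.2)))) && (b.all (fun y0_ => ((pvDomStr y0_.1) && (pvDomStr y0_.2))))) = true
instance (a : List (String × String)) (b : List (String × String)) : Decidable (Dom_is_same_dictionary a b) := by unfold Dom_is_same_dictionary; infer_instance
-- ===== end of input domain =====

-- B replaces A's key-sets / intersection / lookup loop by canonicalise-and-compare:
-- sort both item lists by key and compare the sorted lists (alternative algorithm, same semantics).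


-- ===== PORT A =====
-- for k, v in a.items(): if b[k] != v: return False   (b[k] = Dict.get?; the guard makes a missing key unreachable)
def pvLoopA (b : List (String × String)) : List (String × String) → Bool
  | [] => true
  | (k, v) :: rest =>
    if PySem.Dict.get? (PySem.Dict.mk b) k ≠ some v then false else pvLoopA b rest

def is_same_dictionary (a : List (String × String)) (b : List (String × String)) : Bool :=
  let keysA := PySem.Set.ofList ((PySem.Dict.mk a).keys)
  let keysB := PySem.Set.ofList ((PySem.Dict.mk b).keys)
  let sharedKeys := PySem.Set.inter keysA keysB
  if keysA.length ≠ keysB.length ∨ sharedKeys.length ≠ keysB.length then false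
  else pvLoopA b a

-- ===== PORT B =====
-- return sorted(a.items(), key=lambda kv: kv[0]) == sorted(b.items(), key=lambda kv: kv[0])
def is_same_dictionary_alt (a : List (String × String)) (b : List (String × String)) : Bool :=
  PySem.List.sorted a Prod.fst false == PySem.List.sorted b Prod.fst false

-- ===== PRECONDITION & SPEC =====
-- Pre_ states only that each association list really encodes a Python dict (keys distinct);
-- every dict input satisfies it.
def Pre_is_same_dictionary (a : List (String × String)) (b : List (String × String)) : Prop :=
  (a.map Prod.fst).Nodup ∧ (b.map Prod.fst).Nodup
instance (a : List (String × String)) (b : List (String × String)) : Decidable (Pre_is_same_dictionary a b) := by unfold Pre_is_same_dictionary; infer_instance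
def pvWitness_is_same_dictionary : (List (String × String)) × (List (String × String)) :=
  ([("k", "v"), ("x", "y")], [("x", "y"), ("k", "v")])

def Spec_is_same_dictionary (a : List (String × String)) (b : List (String × String)) (out : Bool) : Prop := out = is_same_dictionary_alt a b
instance (a : List (String × String)) (b : List (String × String)) (out : Bool) : Decidable (Spec_is_same_dictionary a b out) := by unfold Spec_is_same_dictionary; infer_instance

-- ===== CLAIM (what is proved, stated in full; the proofs are below) =====
def Claim_equal_is_same_dictionary : Prop := ∀ (a : List (String × String)) (b : List (String × String)), Dom_is_same_dictionary a b → Pre_is_same_dictionary a b → Spec_is_same_dictionary a b (is_same_dictionary a b)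

-- ===== LEMMAS AND PROOFS =====

-- A's inner loop succeeds iff every item of l is an item of b's dict
theorem loopA_true_iff (b : List (String × String)) (l : List (String × String)) :
    pvLoopA b l = true ↔ ∀ p ∈ l, PySem.Dict.get? (PySem.Dict.mk b) p.1 = some p.2 := by
  induction l with
  | nil => simp [pvLoopA]
  | cons q rest ih =>
    obtain ⟨k, v⟩ := q
    simp only [pvLoopA]
    by_cases h : PySem.Dict.get? (PySem.Dict.mk b) k = some v
    · simp [h, ih]
    · simp [h]

theorem items_mk (b : List (String × String)) : (PySem.Dict.mk b).items = b := rfl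

-- A returns true iff the two association lists are permutations of each other
theorem A_true_iff_perm (a b : List (String × String))
    (ha : (a.map Prod.fst).Nodup) (hb : (b.map Prod.fst).Nodup) :
    is_same_dictionary a b = true ↔ a.Perm b := by
  have hka : (PySem.Dict.mk a).keys = a.map Prod.fst := by simp [PySem.Dict.keys_mk]
  have hkb : (PySem.Dict.mk b).keys = b.map Prod.fst := by simp [PySem.Dict.keys_mk]
  have hsa : PySem.Set.ofList ((PySem.Dict.mk a).keys) = a.map Prod.fst := by
    rw [hka]; exact PySem.Set.ofList_eq_self_of_nodup _ ha
  have hsb : PySem.Set.ofList ((PySem.Dict.mk b).keys) = b.map Prod.fst := by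
    rw [hkb]; exact PySem.Set.ofList_eq_self_of_nodup _ hb
  simp only [is_same_dictionary, hsa, hsb, List.length_map]
  constructor
  · intro h
    by_cases hguard : a.length ≠ b.length ∨
        (PySem.Set.inter (a.map Prod.fst) (b.map Prod.fst)).length ≠ b.length
    · simp [hguard] at h
    · rw [if_neg hguard] at h
      push Not at hguard
      have hsub : a ⊆ b := by
        intro p hp
        have := (loopA_true_iff b a).mp h p hp
        have : p ∈ (PySem.Dict.mk b).items := by
          obtain ⟨k, v⟩ := p
          exact PySem.Dict.mem_items_of_get?_eq_some _ this
        exact this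
      have hnda : a.Nodup := ha.of_map
      have hsp : a.Subperm b := hnda.subperm hsub
      obtain ⟨l, hlp, hls⟩ := hsp
      have : l = b := hls.eq_of_length (by rw [hlp.length_eq, hguard.1])
      exact this ▸ hlp.symm
  · intro hperm
    have hlen := hperm.length_eq
    have hkeys : a.map Prod.fst ⊆ b.map Prod.fst := (hperm.map Prod.fst).subset
    have hinter : PySem.Set.inter (a.map Prod.fst) (b.map Prod.fst) = a.map Prod.fst := by
      simp only [PySem.Set.inter]
      apply List.filter_eq_self.mpr
      intro k hk
      simpa using hkeys hk
    rw [hinter, List.length_map, hlen]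
    simp only [ne_eq, not_true_eq_false, false_or, if_false]
    apply (loopA_true_iff b a).mpr
    intro p hp
    have hpb : p ∈ (PySem.Dict.mk b).items := by rw [items_mk]; exact hperm.subset hp
    obtain ⟨k, v⟩ := p
    exact PySem.Dict.get?_of_mem_items _ hpb (by rw [hkb]; exact hb)

-- pairwise ≤ on keys plus distinct keys gives pairwise < on keys
theorem pairwise_lt_of_le_of_nodup (l : List (String × String))
    (hle : l.Pairwise (fun p q => p.1 ≤ q.1)) (hnd : (l.map Prod.fst).Nodup) :
    l.Pairwise (fun p q => p.1 < q.1) := by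
  have hne : l.Pairwise (fun p q => p.1 ≠ q.1) := by
    rw [List.Nodup, List.pairwise_map] at hnd
    exact hnd
  exact (hle.and hne).imp (fun h => lt_of_le_of_ne h.1 h.2)

-- B returns true iff the two association lists are permutations of each other
theorem B_true_iff_perm (a b : List (String × String))
    (ha : (a.map Prod.fst).Nodup) (_hb : (b.map Prod.fst).Nodup) :
    is_same_dictionary_alt a b = true ↔ a.Perm b := by
  simp only [is_same_dictionary_alt, beq_iff_eq]
  constructor
  · intro h
    exact ((PySem.List.sorted_perm a Prod.fst false).symm).trans
      (h ▸ PySem.List.sorted_perm b Prod.fst false)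
  · intro hperm
    have hperm' : (PySem.List.sorted a Prod.fst false).Perm b :=
      (PySem.List.sorted_perm a Prod.fst false).trans hperm
    have hnd : ((PySem.List.sorted a Prod.fst false).map Prod.fst).Nodup :=
      ((PySem.List.sorted_perm a Prod.fst false).map Prod.fst).nodup_iff.mpr ha
    have hpl : (PySem.List.sorted a Prod.fst false).Pairwise (fun p q => p.1 < q.1) :=
      pairwise_lt_of_le_of_nodup _ (PySem.List.sorted_pairwise a Prod.fst) hnd
    exact (PySem.List.sorted_eq_of_perm_of_pairwise_lt _ _ _ hperm' hpl).symm

-- ===== VERDICT (by name: the statement is the Claim_ definition above) =====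
theorem is_same_dictionary_spec : Claim_equal_is_same_dictionary := by
  intro a b _ hpre
  obtain ⟨ha, hb⟩ := hpre
  show is_same_dictionary a b = is_same_dictionary_alt a b
  rw [Bool.eq_iff_iff, A_true_iff_perm a b ha hb, B_true_iff_perm a b ha hb]
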